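-- pv_equiv track=rewrite | github.com/anorouzi/sector | python/pysphere/trunk/scripts/malstoneB.py | finish_key
-- ===== SOURCE A (Python) =====
-- def finish_key(timeslices, key):
--    running_compromised = 0
--    running_total = 0
--    out = ''
--    for (k,v) in sorted(timeslices.items()):
--        running_compromised = running_compromised + int(v[0])
--        running_total = running_total  + int(v[1])
--        out = out + '|' +  k + ' ' + str(running_compromised) + ' ' + str(running_total)
--
--    return '%s\t%s' % (key, out)
-- ===== SOURCE B (Python) =====
-- def _prefix_sums(xs):
--     sums = []
--     s = 0
--     for x in xs:
--         s += x
--         sums.append(s)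
--     return sums
--
-- def finish_key(timeslices, key):
--     items = sorted(timeslices.items())
--     comp = _prefix_sums(int(v[0]) for _, v in items)
--     tot = _prefix_sums(int(v[1]) for _, v in items)
--     out = ''.join('|' + k + ' ' + str(c) + ' ' + str(t)
--                   for (k, _), c, t in zip(items, comp, tot))
--     return '%s\t%s' % (key, out)
-- ===== Notes on version B (the rewrite author's own statement) =====
-- stated objective: alternative
-- what changed: A interleaves the running totals and the string building in one accumulator loop; B first builds two explicit prefix-sum tables, then formats each sorted item from those tables in a separate join pass.
import Mathlib
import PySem

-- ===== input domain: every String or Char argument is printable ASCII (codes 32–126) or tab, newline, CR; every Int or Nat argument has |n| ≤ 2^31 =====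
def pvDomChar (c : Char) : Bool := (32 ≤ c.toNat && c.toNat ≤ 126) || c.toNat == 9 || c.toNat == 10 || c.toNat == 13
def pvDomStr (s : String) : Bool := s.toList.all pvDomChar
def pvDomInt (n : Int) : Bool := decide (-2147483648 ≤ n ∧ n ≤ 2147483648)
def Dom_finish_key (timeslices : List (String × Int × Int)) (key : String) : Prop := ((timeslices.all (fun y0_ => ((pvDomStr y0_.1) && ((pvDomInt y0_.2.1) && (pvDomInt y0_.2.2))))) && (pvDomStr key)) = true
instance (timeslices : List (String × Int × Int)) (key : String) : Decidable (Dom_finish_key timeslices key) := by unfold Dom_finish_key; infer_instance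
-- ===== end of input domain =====

-- B replaces A's single interleaved accumulator loop by two explicit prefix-sum
-- tables plus a separate formatting/join pass (objective: alternative decomposition).
-- The dict argument is the association list read with Python dict semantics
-- (PySem.Dict.ofList: last value wins, first position kept), as dict(pairs) does.

-- ===== PORT A =====
-- one fold carrying (running_compromised, running_total, out); strings as List Char
def finish_key (timeslices : List (String × Int × Int)) (key : String) : String :=
  let items := PySem.List.sorted (PySem.Dict.ofList timeslices).items (fun p => p.1) false
  let st := items.foldl
    (fun (acc : Int × Int × List Char) kv =>
      let rc := acc.1 + kv.2.1
      let rt := acc.2.1 + kv.2.2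
      (rc, rt, acc.2.2 ++ '|' :: kv.1.toList ++ ' ' :: PySem.Int.toChars rc ++ ' ' :: PySem.Int.toChars rt))
    ((0 : Int), (0 : Int), ([] : List Char))
  String.ofList (key.toList ++ '\t' :: st.2.2)

-- ===== PORT B =====
-- _prefix_sums: loop appending the running sum (Source B's helper, step for step)
def pvPrefixSums (xs : List Int) : List Int :=
  (xs.foldl (fun (p : List Int × Int) x => (p.1 ++ [p.2 + x], p.2 + x)) (([] : List Int), (0 : Int))).1

def finish_key_alt (timeslices : List (String × Int × Int)) (key : String) : String :=
  let items := PySem.List.sorted (PySem.Dict.ofList timeslices).items (fun p => p.1) false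
  let comp := pvPrefixSums (items.map (fun p => p.2.1))
  let tot := pvPrefixSums (items.map (fun p => p.2.2))
  let out := (((items.zip comp).zip tot).map
    (fun q => '|' :: q.1.1.1.toList ++ ' ' :: PySem.Int.toChars q.1.2 ++ ' ' :: PySem.Int.toChars q.2)).flatten
  String.ofList (key.toList ++ '\t' :: out)

-- ===== PRECONDITION & SPEC =====
def Spec_finish_key (timeslices : List (String × Int × Int)) (key : String) (out : String) : Prop := out = finish_key_alt timeslices key
instance (timeslices : List (String × Int × Int)) (key : String) (out : String) : Decidable (Spec_finish_key timeslices key out) := by unfold Spec_finish_key; infer_instance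

-- ===== CLAIM (what is proved, stated in full; the proofs are below) =====
def Claim_equal_finish_key : Prop := ∀ (timeslices : List (String × Int × Int)) (key : String), Dom_finish_key timeslices key → Spec_finish_key timeslices key (finish_key timeslices key)

-- ===== LEMMAS AND PROOFS =====

-- prefix sums starting from s (proof-side characterisation of pvPrefixSums)
def pvAccFrom (s : Int) : List Int → List Int
  | [] => []
  | x :: xs => (s + x) :: pvAccFrom (s + x) xs

theorem pvPrefixSums_foldl (xs : List Int) (acc : List Int) (s : Int) :
    (xs.foldl (fun (p : List Int × Int) x => (p.1 ++ [p.2 + x], p.2 + x)) (acc, s)).1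
      = acc ++ pvAccFrom s xs := by
  induction xs generalizing acc s with
  | nil => simp [pvAccFrom]
  | cons x xs ih => simp [List.foldl, pvAccFrom, ih]

theorem pvPrefixSums_eq (xs : List Int) : pvPrefixSums xs = pvAccFrom 0 xs := by
  simpa using pvPrefixSums_foldl xs [] 0

-- the loop of A equals the flatten-of-segments form, for any starting accumulators
theorem pvLoop_eq (l : List (String × Int × Int)) (rc rt : Int) (out : List Char) :
    (l.foldl
      (fun (acc : Int × Int × List Char) kv =>
        let a := acc.1 + kv.2.1
        let b := acc.2.1 + kv.2.2
        (a, b, acc.2.2 ++ '|' :: kv.1.toList ++ ' ' :: PySem.Int.toChars a ++ ' ' :: PySem.Int.toChars b))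
      (rc, rt, out)).2.2
    = out ++ (((l.zip (pvAccFrom rc (l.map (fun p => p.2.1)))).zip (pvAccFrom rt (l.map (fun p => p.2.2)))).map
        (fun q => '|' :: q.1.1.1.toList ++ ' ' :: PySem.Int.toChars q.1.2 ++ ' ' :: PySem.Int.toChars q.2)).flatten := by
  induction l generalizing rc rt out with
  | nil => simp
  | cons kv l ih =>
      simp only [List.foldl, List.map, pvAccFrom, List.zip_cons_cons, List.map_cons,
        List.flatten_cons]
      rw [ih]
      simp [List.append_assoc]

-- ===== VERDICT (by name: the statement is the Claim_ definition above) =====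
theorem finish_key_spec : Claim_equal_finish_key := by
  intro timeslices key _
  unfold Spec_finish_key finish_key finish_key_alt
  simp only [pvPrefixSums_eq, pvLoop_eq, List.nil_append]
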